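-- pv_equiv track=rewrite | github.com/nkongenelly/ArtificialIntelligence | Edvancer/Exercises/python_fundamentals/three.py | func_three
-- ===== SOURCE A (Python) =====
-- def func_three(input_list):
--     sorted_list = list(sorted(input_list, key = len))
--
--     same_length_res = []
--     for id, str in enumerate(sorted_list):
--         if id != len(sorted_list) -1 and len(str) == len(sorted_list[id+1]):
--             same_length_res.extend([str, sorted_list[id+1]])
--             break
--     return same_length_res
-- ===== SOURCE B (Python) =====
-- def func_three(input_list):
--     # One pass: length -> first string seen; on a second string of that length,
--     # record the pair once. Answer = pair for the smallest duplicated length.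
--     seen = {}
--     pairs = {}
--     for s in input_list:
--         l = len(s)
--         if l in pairs:
--             continue
--         if l in seen:
--             pairs[l] = [seen[l], s]
--         else:
--             seen[l] = s
--     if not pairs:
--         return []
--     return pairs[min(pairs)]
-- ===== Notes on version B (the rewrite author's own statement) =====
-- stated objective: faster
-- what changed: B drops the sort entirely: a single pass records, per string length, the first two strings of that length in a dict, and the answer is the recorded pair of the smallest duplicated length, instead of A's sort-by-length followed by an adjacent-equal-length scan.
import Mathlib
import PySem

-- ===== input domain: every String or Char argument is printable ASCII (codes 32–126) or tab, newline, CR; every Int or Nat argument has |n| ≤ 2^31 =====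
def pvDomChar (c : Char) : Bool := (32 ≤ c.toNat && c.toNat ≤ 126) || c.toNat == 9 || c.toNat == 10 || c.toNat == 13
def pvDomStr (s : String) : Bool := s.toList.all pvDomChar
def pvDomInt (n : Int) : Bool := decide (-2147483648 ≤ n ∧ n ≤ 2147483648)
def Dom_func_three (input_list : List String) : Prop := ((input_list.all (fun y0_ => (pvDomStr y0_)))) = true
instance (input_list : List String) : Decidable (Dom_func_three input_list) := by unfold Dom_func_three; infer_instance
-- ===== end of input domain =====

-- B replaces A's sort-then-scan-adjacent-pairs by a single pass that records, per string
-- length, the first two strings of that length, then returns the pair of the smallest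
-- duplicated length (objective: faster, one pass instead of a sort).


-- ===== PORT A =====
-- the 'for id, str in enumerate(sorted_list): if … : extend; break' loop (break = return here;
-- falling off the end returns the still-empty same_length_res)
def aLoop (sl : List String) (n : Int) : List (Int × String) → List String
  | [] => []
  | (id, str) :: rest =>
    if id ≠ n - 1 ∧ PySem.Str.len str = PySem.Str.len (PySem.List.pyGetD sl (id + 1) "") then
      [str, PySem.List.pyGetD sl (id + 1) ""]
    else aLoop sl n rest

def func_three (input_list : List String) : List String :=
  let sorted_list := PySem.List.sorted input_list PySem.Str.len
  aLoop sorted_list (sorted_list.length : Int) (PySem.List.enumerate sorted_list 0)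

-- ===== PORT B =====
-- one pass over the input: seen = length -> first string of that length,
-- pairs = length -> its first two strings (inserted once, on the second occurrence)
def bLoop : List String → PySem.Dict Int String → PySem.Dict Int (List String) → PySem.Dict Int (List String)
  | [], _, pairs => pairs
  | s :: rest, seen, pairs =>
    let l := PySem.Str.len s
    if pairs.contains l then bLoop rest seen pairs
    else
      match seen.get? l with
      | some t => bLoop rest seen (pairs.insert l [t, s])
      | none => bLoop rest (seen.insert l s) pairs

def func_three_alt (input_list : List String) : List String :=
  let pairs := bLoop input_list PySem.Dict.empty PySem.Dict.empty
  if pairs.keys.isEmpty then []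
  else pairs.getD (PySem.List.minD pairs.keys (fun x => x) 0) []

-- ===== PRECONDITION & SPEC =====
def Spec_func_three (input_list : List String) (out : List String) : Prop := out = func_three_alt input_list
instance (input_list : List String) (out : List String) : Decidable (Spec_func_three input_list out) := by unfold Spec_func_three; infer_instance

-- ===== CLAIM (what is proved, stated in full; the proofs are below) =====
def Claim_equal_func_three : Prop := ∀ (input_list : List String), Dom_func_three input_list → Spec_func_three input_list (func_three input_list)

-- ===== LEMMAS AND PROOFS =====

-- The common value both programs compute, stated for an arbitrary key f (instantiated with
-- PySem.Str.len): the first two strings, in input order, of the smallest f-value occurring twice.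
def lensOfG (f : String → Int) (xs : List String) : List Int := xs.map f
def dupLensG (f : String → Int) (xs : List String) : List Int :=
  (lensOfG f xs).filter (fun l => 2 ≤ (lensOfG f xs).count l)
def canonG (f : String → Int) (xs : List String) : List String :=
  match PySem.List.min? (dupLensG f xs) (fun x => x) with
  | none => []
  | some m => (xs.filter (fun s => f s = m)).take 2

-- the adjacent-pair scan that aLoop-over-enumerate performs
def scanAdjG (f : String → Int) : List String → List String
  | a :: b :: rest => if f a = f b then [a, b] else scanAdjG f (b :: rest)
  | _ => []

lemma cntG (f : String → Int) (p : List String) (l : Int) :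
    (lensOfG f p).count l = (p.filter (fun s => f s = l)).length := by
  induction p with
  | nil => rfl
  | cons a t ih =>
    simp only [lensOfG, List.map_cons, List.count_cons, List.filter_cons] at *
    by_cases h : f a = l
    · subst h
      simp [ih]
    · simp [h, (by simpa using h : ¬ (f a == l) = true), ih]

lemma aLoop_drop (sl : List String) (ys : List String) : ∀ (i : Nat), ys = sl.drop i →
    aLoop sl (sl.length : Int) (PySem.List.enumerate ys (i : Int)) = scanAdjG PySem.Str.len ys := by
  induction ys with
  | nil => intro i _; simp [aLoop, scanAdjG, PySem.List.enumerate_nil]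
  | cons a tl ih =>
    intro i h
    have hlen : sl.length = i + (tl.length + 1) := by
      have := congrArg List.length h
      simp [List.length_drop] at this
      omega
    have htl : tl = sl.drop (i + 1) := by
      have := congrArg List.tail h
      simpa [List.tail_drop] using this
    match tl, htl, ih with
    | [], htl, ih =>
      rw [PySem.List.enumerate_cons]
      show aLoop _ _ _ = _
      rw [aLoop, if_neg, PySem.List.enumerate_nil]
      · rfl
      · rintro ⟨h1, -⟩
        apply h1
        simp [hlen]
    | b :: rest, htl, ih =>
      have hb : PySem.List.pyGetD sl ((i : Int) + 1) "" = b := by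
        have hsl : sl[i+1]? = some b := by
          have h0 : (sl.drop (i+1))[0]? = sl[(i+1)+0]? := List.getElem?_drop
          rw [← htl] at h0
          simpa using h0.symm
        have h2 : ((i : Int) + 1) = ((i + 1 : Nat) : Int) := by push_cast; ring
        rw [h2, PySem.List.pyGetD_natCast, List.getD_eq_getElem?_getD, hsl]
        rfl
      rw [PySem.List.enumerate_cons]
      show aLoop _ _ _ = _
      rw [aLoop, scanAdjG, hb]
      by_cases hab : PySem.Str.len a = PySem.Str.len b
      · rw [if_pos, if_pos hab]
        exact ⟨by simp [hlen]; omega, hab⟩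
      · rw [if_neg, if_neg hab]
        · have h2 : ((i : Int) + 1) = ((i + 1 : Nat) : Int) := by push_cast; ring
          rw [h2]
          exact ih (i + 1) htl
        · rintro ⟨-, h2⟩; exact hab h2

lemma scanAdjG_spec (f : String → Int) (σ : List String)
    (hp : σ.Pairwise (fun a b => f a ≤ f b)) :
    scanAdjG f σ = canonG f σ := by
  induction σ with
  | nil => simp [scanAdjG, canonG, dupLensG, lensOfG, PySem.List.min?]
  | cons a tl ih =>
    match tl, hp, ih with
    | [], hp, ih => simp [scanAdjG, canonG, dupLensG, lensOfG, PySem.List.min?, List.count_cons]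
    | b :: rest, hp, ih =>
      have ha2 : ∀ y ∈ b :: rest, f a ≤ f y := (List.pairwise_cons.mp hp).1
      have hptl : (b :: rest).Pairwise (fun x y => f x ≤ f y) := (List.pairwise_cons.mp hp).2
      by_cases hab : f a = f b
      · -- first adjacent equal pair sits at the head; its length is the minimal duplicated one
        have hmem : f a ∈ dupLensG f (a :: b :: rest) := by
          simp [dupLensG, lensOfG, List.count_cons, hab]
        rcases hm : PySem.List.min? (dupLensG f (a :: b :: rest)) (fun x => x) with _ | m
        · rw [PySem.List.min?_eq_none_iff] at hm
          rw [hm] at hmem; exact absurd hmem (List.not_mem_nil)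
        · have h1 := PySem.List.min?_isMin hm _ hmem
          have h2 : f a ≤ m := by
            have hmm := PySem.List.min?_mem hm
            have : m ∈ lensOfG f (a :: b :: rest) := List.mem_of_mem_filter hmm
            simp only [lensOfG, List.map_cons, List.mem_cons, List.mem_map] at this
            rcases this with h | h | ⟨y, hy, hly⟩
            · exact h.ge
            · rw [h, ← hab]
            · rw [← hly]; exact ha2 y (List.mem_cons_of_mem _ hy)
          simp only at h1
          have hma : m = f a := le_antisymm h1 h2
          rw [scanAdjG, if_pos hab]
          unfold canonG
          rw [hm, hma]
          simp [hab.symm]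
      · -- the head's length is strictly smaller than every other, hence not duplicated: drop it
        have hstrict : ∀ y ∈ b :: rest, f a < f y := by
          intro y hy
          rcases List.mem_cons.mp hy with h | h
          · subst h; exact lt_of_le_of_ne (ha2 _ (List.mem_cons_self)) hab
          · calc f a < f b := lt_of_le_of_ne (ha2 _ (List.mem_cons_self)) hab
              _ ≤ f y := (List.pairwise_cons.mp hptl).1 y h
        have hnotin : f a ∉ lensOfG f (b :: rest) := by
          simp only [lensOfG, List.mem_map]
          rintro ⟨y, hy, hly⟩
          exact absurd hly.symm (ne_of_lt (hstrict y hy))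
        have hhd : lensOfG f (a :: b :: rest) = f a :: lensOfG f (b :: rest) := rfl
        have hcnt : (lensOfG f (a :: b :: rest)).count (f a) = 1 := by
          rw [hhd, List.count_cons_self, List.count_eq_zero_of_not_mem hnotin]
        have heq1 : dupLensG f (a :: b :: rest) = dupLensG f (b :: rest) := by
          unfold dupLensG
          rw [hhd, List.filter_cons, if_neg (by rw [← hhd]; simp [hcnt])]
          apply List.filter_congr
          intro l hl
          have hne : ¬ (f a = l) := fun h => hnotin (h ▸ hl)
          rw [← hhd]
          simp [hhd, hne]
        rw [scanAdjG, if_neg hab, ih hptl]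
        unfold canonG
        rw [heq1]
        rcases hm : PySem.List.min? (dupLensG f (b :: rest)) (fun x => x) with _ | m
        · rfl
        · have hmT : m ∈ lensOfG f (b :: rest) := List.mem_of_mem_filter (PySem.List.min?_mem hm)
          have hne : ¬ (f a = m) := fun h => hnotin (h ▸ hmT)
          simp [hne]

lemma min?_id_perm (l1 l2 : List Int) (h : l1.Perm l2) :
    PySem.List.min? l1 (fun x => x) = PySem.List.min? l2 (fun x => x) := by
  rcases h1 : PySem.List.min? l1 (fun x => x) with _ | m1
  · rw [PySem.List.min?_eq_none_iff] at h1
    subst h1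
    rw [h.nil_eq.symm]
    rfl
  · rcases h2 : PySem.List.min? l2 (fun x => x) with _ | m2
    · rw [PySem.List.min?_eq_none_iff] at h2
      subst h2
      exact absurd (h.mem_iff.mp (PySem.List.min?_mem h1)) (List.not_mem_nil)
    · have b1 := PySem.List.min?_isMin h1 m2 (h.symm.mem_iff.mp (PySem.List.min?_mem h2))
      have b2 := PySem.List.min?_isMin h2 m1 (h.mem_iff.mp (PySem.List.min?_mem h1))
      simp at b1 b2 ⊢
      omega

-- stability of Python's sort: inserting x leaves the relative order of equal keys alone
lemma filter_insertByG (f : String → Int) (x : String) (ys : List String) (m : Int)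
    (hp : ys.Pairwise (fun a b => f a ≤ f b)) :
    (PySem.List.insertBy (fun a b => decide (f a < f b)) x ys).filter (fun s => f s = m) =
      if f x = m then ys.filter (fun s => f s = m) ++ [x]
      else ys.filter (fun s => f s = m) := by
  induction ys with
  | nil => by_cases h : f x = m <;> simp [PySem.List.insertBy, h]
  | cons y ys' ih =>
    rw [PySem.List.insertBy]
    by_cases hxy : f x < f y
    · rw [if_pos (by simpa using hxy)]
      by_cases hxm : f x = m
      · have hnil : (y :: ys').filter (fun s => f s = m) = [] := by
          rw [List.filter_eq_nil_iff]
          intro z hz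
          have : f x < f z := by
            rcases List.mem_cons.mp hz with h | h
            · subst h; exact hxy
            · exact lt_of_lt_of_le hxy ((List.pairwise_cons.mp hp).1 z h)
          simp
          omega
        simp [hxm, hnil]
      · simp [hxm]
    · rw [if_neg (by simpa using hxy)]
      have ihh := ih (List.pairwise_cons.mp hp).2
      by_cases hym : f y = m <;> by_cases hxm : f x = m <;>
        simp [List.filter_cons, hym, hxm, ihh]

lemma sorted_filter_lenG (f : String → Int) (xs : List String) (m : Int) :
    (PySem.List.sorted xs f).filter (fun s => f s = m) = xs.filter (fun s => f s = m) := by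
  induction xs using List.reverseRecOn with
  | nil => rfl
  | append_singleton xs x ih =>
    have hs : PySem.List.sorted (xs ++ [x]) f =
        PySem.List.insertBy (fun a b => decide (f a < f b)) x (PySem.List.sorted xs f) := by
      rw [PySem.List.sorted_eq_foldl_insertBy, PySem.List.sorted_eq_foldl_insertBy,
        List.foldl_append]
      rfl
    rw [hs, filter_insertByG f x _ m (PySem.List.sorted_pairwise _ _), List.filter_append]
    by_cases h : f x = m <;> simp [h, ih]

lemma dupLensG_perm (f : String → Int) (xs ys : List String) (h : xs.Perm ys) :
    (dupLensG f xs).Perm (dupLensG f ys) := by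
  have hlens : (lensOfG f xs).Perm (lensOfG f ys) := h.map f
  have hcongr : dupLensG f xs
      = (lensOfG f xs).filter (fun l => 2 ≤ (lensOfG f ys).count l) := by
    unfold dupLensG
    apply List.filter_congr
    intro l _
    rw [hlens.count_eq]
  rw [hcongr]
  exact hlens.filter _

lemma canonG_sorted (f : String → Int) (xs : List String) :
    canonG f (PySem.List.sorted xs f) = canonG f xs := by
  have hperm : (PySem.List.sorted xs f).Perm xs := PySem.List.sorted_perm xs f false
  unfold canonG
  rw [min?_id_perm _ _ (dupLensG_perm f _ _ hperm)]
  rcases PySem.List.min? (dupLensG f xs) (fun x => x) with _ | m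
  · rfl
  · show ((PySem.List.sorted xs f).filter (fun s => f s = m)).take 2
        = (xs.filter (fun s => f s = m)).take 2
    rw [sorted_filter_lenG]

lemma a_eq_canon (xs : List String) : func_three xs = canonG PySem.Str.len xs := by
  show aLoop _ _ _ = _
  have h0 := aLoop_drop (PySem.List.sorted xs PySem.Str.len) (PySem.List.sorted xs PySem.Str.len)
    0 (by simp)
  rw [show ((0 : Nat) : Int) = (0 : Int) from rfl] at h0
  rw [h0, scanAdjG_spec _ _ (PySem.List.sorted_pairwise xs PySem.Str.len), canonG_sorted]

-- the loop invariant of B: after processing prefix p, 'seen' holds the first string of each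
-- seen length and 'pairs' the first two strings of each length seen at least twice
def bLoopG (f : String → Int) : List String → PySem.Dict Int String →
    PySem.Dict Int (List String) → PySem.Dict Int (List String)
  | [], _, pairs => pairs
  | s :: rest, seen, pairs =>
    let l := f s
    if pairs.contains l then bLoopG f rest seen pairs
    else
      match seen.get? l with
      | some t => bLoopG f rest seen (pairs.insert l [t, s])
      | none => bLoopG f rest (seen.insert l s) pairs

lemma bLoop_eq_bLoopG (rest : List String) : ∀ seen pairs,
    bLoop rest seen pairs = bLoopG PySem.Str.len rest seen pairs := by
  induction rest with
  | nil => intro seen pairs; rfl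
  | cons s rest' ih =>
    intro seen pairs
    rw [bLoop, bLoopG]
    by_cases hc : pairs.contains (PySem.Str.len s) = true
    · simp only [hc, if_true, ih]
    · simp only [hc, if_false]
      rcases seen.get? (PySem.Str.len s) with _ | t <;> simp only [ih]

lemma bLoopG_spec (f : String → Int) (rest : List String) : ∀ (p : List String)
    (seen : PySem.Dict Int String) (pairs : PySem.Dict Int (List String)),
    (∀ l, seen.get? l = (p.filter (fun s => f s = l)).head?) →
    (∀ l, pairs.get? l = if 2 ≤ (lensOfG f p).count l
        then some ((p.filter (fun s => f s = l)).take 2) else none) →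
    pairs.keys.Nodup →
    (∀ l, (bLoopG f rest seen pairs).get? l = if 2 ≤ (lensOfG f (p ++ rest)).count l
        then some (((p ++ rest).filter (fun s => f s = l)).take 2) else none) ∧
      (bLoopG f rest seen pairs).keys.Nodup := by
  induction rest with
  | nil => intro p seen pairs hs hp hn; simpa using ⟨hp, hn⟩
  | cons s rest' ih =>
    intro p seen pairs hs hp hn
    have hC : ∀ l, (lensOfG f (p ++ [s])).count l
        = (lensOfG f p).count l + (if f s = l then 1 else 0) := by
      intro l
      simp [lensOfG, List.count_append, List.count_cons]
    have hF : ∀ l, (p ++ [s]).filter (fun s' => f s' = l)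
        = p.filter (fun s' => f s' = l) ++ (if f s = l then [s] else []) := by
      intro l
      by_cases h : f s = l <;> simp [List.filter_append, h]
    have hassoc : (p ++ [s]) ++ rest' = p ++ (s :: rest') := by simp
    rw [show bLoopG f (s :: rest') seen pairs
        = (if pairs.contains (f s) then bLoopG f rest' seen pairs
           else match seen.get? (f s) with
            | some t => bLoopG f rest' seen (pairs.insert (f s) [t, s])
            | none => bLoopG f rest' (seen.insert (f s) s) pairs) from rfl]
    by_cases hc : pairs.contains (f s) = true
    · -- this length already has its pair: nothing changes
      rw [if_pos hc]
      have h2 : 2 ≤ (lensOfG f p).count (f s) := by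
        by_contra hlt
        have := hp (f s)
        rw [if_neg hlt] at this
        rw [PySem.Dict.contains_eq_isSome_get?, this] at hc
        simp at hc
      have hlong : 2 ≤ (p.filter (fun s' => f s' = f s)).length := by rw [← cntG]; exact h2
      rw [← hassoc]
      apply ih (p ++ [s]) seen pairs _ _ hn
      · intro l
        rw [hs l, hF l]
        by_cases h : f s = l
        · subst h
          rcases hne : p.filter (fun s' => f s' = f s) with _ | ⟨x, xs⟩
          · rw [hne] at hlong; simp at hlong
          · simp [hne]
        · simp [h]
      · intro l
        rw [hp l, hC l, hF l]
        by_cases h : f s = l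
        · simp only [if_pos h]
          subst h
          rw [if_pos h2, if_pos (by omega), List.take_append_of_le_length hlong]
        · simp [h]
    · have hcn : pairs.get? (f s) = none := by
        rw [PySem.Dict.contains_eq_isSome_get?] at hc
        exact Option.not_isSome_iff_eq_none.mp (by simpa using hc)
      have hnot2 : ¬ 2 ≤ (lensOfG f p).count (f s) := by
        intro h2
        rw [hp (f s), if_pos h2] at hcn
        simp at hcn
      rw [if_neg hc]
      rcases hsg : seen.get? (f s) with _ | t
      · -- first string of this length
        have hFnil : p.filter (fun s' => f s' = f s) = [] := by
          have := hs (f s)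
          rw [hsg] at this
          exact List.head?_eq_none_iff.mp this.symm
        have hC0 : (lensOfG f p).count (f s) = 0 := by rw [cntG, hFnil]; rfl
        rw [← hassoc]
        apply ih (p ++ [s]) (seen.insert (f s) s) pairs _ _ hn
        · intro l
          rw [PySem.Dict.get?_insert, hF l]
          by_cases h : l = f s
          · subst h; simp [hFnil]
          · rw [if_neg h, hs l, if_neg (fun hh => h hh.symm)]
            simp
        · intro l
          rw [hp l, hC l, hF l]
          by_cases h : f s = l
          · subst h
            simp only [eq_self_iff_true, if_true]
            rw [if_neg hnot2, if_neg (by omega)]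
          · simp [h]
      · -- second string of this length: record the pair
        have hhead : (p.filter (fun s' => f s' = f s)).head? = some t := by
          rw [← hs (f s)]; exact hsg
        have hC1 : (lensOfG f p).count (f s) = 1 := by
          have hpos : 0 < (p.filter (fun s' => f s' = f s)).length := by
            rcases hne : p.filter (fun s' => f s' = f s) with _ | _
            · rw [hne] at hhead; simp at hhead
            · simp [hne]
          rw [cntG] at hnot2 ⊢
          omega
        have hFt : p.filter (fun s' => f s' = f s) = [t] := by
          have hlen1 : (p.filter (fun s' => f s' = f s)).length = 1 := by
            rw [← cntG, hC1]
          rcases List.length_eq_one_iff.mp hlen1 with ⟨x, hx⟩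
          rw [hx] at hhead ⊢
          simp at hhead
          rw [hhead]
        rw [← hassoc]
        apply ih (p ++ [s]) seen (pairs.insert (f s) [t, s]) _ _
          (PySem.Dict.nodup_keys_insert pairs _ _ hn)
        · intro l
          rw [hs l, hF l]
          by_cases h : f s = l
          · subst h; simp [hFt]
          · simp [h]
        · intro l
          rw [PySem.Dict.get?_insert, hC l, hF l]
          by_cases h : l = f s
          · subst h
            simp only [eq_self_iff_true, if_true]
            rw [if_pos (by omega), hFt]
            rfl
          · have h' : ¬ f s = l := fun hh => h hh.symm
            simp only [if_neg h, if_neg h', List.append_nil, Nat.add_zero]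
            exact hp l

lemma b_eq_canon (xs : List String) : func_three_alt xs = canonG PySem.Str.len xs := by
  show (if (bLoop xs _ _).keys.isEmpty then _ else _) = _
  rw [bLoop_eq_bLoopG]
  obtain ⟨HP, Hnd⟩ := bLoopG_spec PySem.Str.len xs [] PySem.Dict.empty PySem.Dict.empty
    (fun l => by simp [PySem.Dict.get?_empty])
    (fun l => by simp [PySem.Dict.get?_empty, lensOfG])
    (by simp [PySem.Dict.keys_empty])
  rw [show ([] : List String) ++ xs = xs from rfl] at HP
  set P := bLoopG PySem.Str.len xs PySem.Dict.empty PySem.Dict.empty with hP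
  have hkeys : ∀ l, l ∈ P.keys ↔ 2 ≤ (lensOfG PySem.Str.len xs).count l := by
    intro l
    constructor
    · intro hl
      by_contra hnot
      have := HP l
      rw [if_neg hnot, PySem.Dict.get?_eq_none_iff_not_mem_keys] at this
      exact this hl
    · intro h2
      by_contra hl
      have := (PySem.Dict.get?_eq_none_iff_not_mem_keys P l).mpr hl
      rw [HP l, if_pos h2] at this
      exact Option.some_ne_none _ this
  have hmemdup : ∀ l, l ∈ dupLensG PySem.Str.len xs ↔ 2 ≤ (lensOfG PySem.Str.len xs).count l := by
    intro l
    constructor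
    · intro hl
      have := List.of_mem_filter hl
      simpa using this
    · intro h2
      apply List.mem_filter.mpr
      exact ⟨List.count_pos_iff.mp (by omega), by simpa using h2⟩
  unfold canonG
  by_cases hnil : dupLensG PySem.Str.len xs = []
  · -- no duplicated length at all
    have hkeysnil : P.keys = [] := by
      rw [List.eq_nil_iff_forall_not_mem]
      intro l hl
      have := (hmemdup l).mpr ((hkeys l).mp hl)
      rw [hnil] at this
      exact absurd this (List.not_mem_nil)
    rw [hnil, hkeysnil]
    rfl
  · -- nonempty: the recorded pair of the minimal key is the canonical answer
    rcases hm1 : PySem.List.min? (dupLensG PySem.Str.len xs) (fun x => x) with _ | m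
    · rw [PySem.List.min?_eq_none_iff] at hm1
      exact absurd hm1 hnil
    · have hmmem := PySem.List.min?_mem hm1
      have hmmin := PySem.List.min?_isMin hm1
      have hmkeys : m ∈ P.keys := (hkeys m).mpr ((hmemdup m).mp hmmem)
      rw [if_neg (by rw [List.isEmpty_iff]; exact List.ne_nil_of_mem hmkeys)]
      rcases hm0 : PySem.List.min? P.keys (fun x => x) with _ | k0
      · rw [PySem.List.min?_eq_none_iff] at hm0
        rw [hm0] at hmkeys
        exact absurd hmkeys (List.not_mem_nil)
      · have hk0mem := PySem.List.min?_mem hm0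
        have hk0min := PySem.List.min?_isMin hm0
        have hk0dup : k0 ∈ dupLensG PySem.Str.len xs := (hmemdup k0).mpr ((hkeys k0).mp hk0mem)
        have h1 : m ≤ k0 := by simpa using hmmin k0 hk0dup
        have h2 : k0 ≤ m := by simpa using hk0min m hmkeys
        have hk0m : k0 = m := le_antisymm h2 h1
        rw [PySem.List.minD, hm0]
        show P.getD k0 [] = _
        rw [PySem.Dict.getD, HP k0, if_pos ((hmemdup k0).mp hk0dup), hk0m]
        rfl

-- ===== VERDICT (by name: the statement is the Claim_ definition above) =====
theorem func_three_spec : Claim_equal_func_three := by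
  intro xs _
  unfold Spec_func_three
  rw [a_eq_canon, b_eq_canon]
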